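-- pv_equiv track=rewrite | github.com/hdperezn/Microbe_atlas_foundation | MetaFormer/dataloaders.py | truncate_taxonomy_up_to_rank
-- ===== SOURCE A (Python) =====
-- def truncate_taxonomy_up_to_rank(taxonomy_str, rank_code="f"):
--     """
--     Given a full taxonomy like:
--       d__Bacteria;p__Firmicutes;c__Bacilli;o__Haloplasmatales;f__Turicibacteraceae;g__Turicibacter;s__Turicibacter
--     and a rank_code like 'f', return:
--       'd__Bacteria;p__Firmicutes;c__Bacilli;o__Haloplasmatales;f__Turicibacteraceae'
--     If the rank_code is not found, return the original string.
--     """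
--     parts = taxonomy_str.split(';')
--     # parts = [
--     #   'd__Bacteria', 'p__Firmicutes', 'c__Bacilli',
--     #   'o__Haloplasmatales', 'f__Turicibacteraceae',
--     #   'g__Turicibacter', 's__Turicibacter'
--     # ]
--
--     # We look for the first part that starts with e.g. 'f__'
--     target_prefix = rank_code + "__"
--
--     truncated_parts = []
--     for p in parts:
--         truncated_parts.append(p)
--         if p.startswith(target_prefix):
--             # Stop once we've included the target rank
--             break
--
--     return ";".join(truncated_parts)
-- ===== SOURCE B (Python) =====
-- def truncate_taxonomy_up_to_rank(taxonomy_str, rank_code="f"):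
--     # Single left-to-right scan over the raw string: no split list, no join.
--     # At each segment boundary (';' or end of string) test whether the segment
--     # that just ended starts with rank_code + "__"; if so, cut there.
--     prefix = rank_code + "__"
--     n = len(taxonomy_str)
--     seg_start = 0
--     for i in range(n + 1):
--         if i == n or taxonomy_str[i] == ';':
--             if taxonomy_str.startswith(prefix, seg_start, i):
--                 return taxonomy_str[:i]
--             seg_start = i + 1
--     return taxonomy_str
-- ===== Notes on version B (the rewrite author's own statement) =====
-- stated objective: alternative
-- what changed: Instead of splitting on ';' into a list, looping with an accumulator and re-joining, B makes a single index scan over the raw string, testing the prefix at each segment boundary with a bounded startswith and returning a slice of the original string.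
import Mathlib
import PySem

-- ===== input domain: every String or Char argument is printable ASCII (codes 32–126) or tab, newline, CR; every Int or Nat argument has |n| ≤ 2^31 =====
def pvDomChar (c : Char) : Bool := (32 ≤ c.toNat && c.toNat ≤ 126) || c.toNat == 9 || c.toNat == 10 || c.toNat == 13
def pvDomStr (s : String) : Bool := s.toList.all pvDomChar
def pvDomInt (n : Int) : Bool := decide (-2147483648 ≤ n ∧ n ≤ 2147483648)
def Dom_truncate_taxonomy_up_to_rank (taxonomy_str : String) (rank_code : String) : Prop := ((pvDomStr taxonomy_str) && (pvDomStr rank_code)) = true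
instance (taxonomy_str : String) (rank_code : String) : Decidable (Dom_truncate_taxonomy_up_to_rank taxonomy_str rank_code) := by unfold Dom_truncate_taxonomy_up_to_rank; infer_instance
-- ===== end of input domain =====

-- B replaces A's split/accumulate/join by a single index scan over the raw string (alternative decomposition, same O(n) cost).

-- ===== PORT A =====
-- A's loop with `break`: append each part, stop after the first part starting with the prefix.
def pvLoopA (pfx : List Char) : List (List Char) → List (List Char)
  | [] => []
  | p :: ps => if PySem.Chars.startswith p pfx then [p] else p :: pvLoopA pfx ps

def truncate_taxonomy_up_to_rank (taxonomy_str : String) (rank_code : String) : String :=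
  let parts := PySem.Chars.splitOn taxonomy_str.toList [';']   -- taxonomy_str.split(';')
  let pfx := rank_code.toList ++ ['_', '_']                    -- rank_code + "__"
  String.ofList (PySem.Chars.join [';'] (pvLoopA pfx parts))   -- ";".join(truncated_parts)

-- ===== PORT B =====
-- B's for-loop over range(n+1) with early return; segStart is the current segment start.
-- Python's bounded `taxonomy_str.startswith(prefix, seg_start, i)` is exactly `startswith`
-- of the slice s[seg_start:i] (exact here: 0 ≤ seg_start and 0 ≤ i ≤ len(s) in every call).
def pvScanB (s pfx : List Char) (n : Nat) : List Nat → Nat → List Char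
  | [], _ => s
  | i :: is, segStart =>
    if i = n ∨ PySem.List.pyGetD s (i : Int) ' ' = ';' then    -- i == n or taxonomy_str[i] == ';'
      if PySem.Chars.startswith (PySem.List.slice s (some (segStart : Int)) (some (i : Int))) pfx then
        PySem.List.slice s none (some (i : Int))               -- return taxonomy_str[:i]
      else pvScanB s pfx n is (i + 1)                          -- seg_start = i + 1
    else pvScanB s pfx n is segStart

def truncate_taxonomy_up_to_rank_alt (taxonomy_str : String) (rank_code : String) : String :=
  let s := taxonomy_str.toList
  let pfx := rank_code.toList ++ ['_', '_']
  String.ofList (pvScanB s pfx s.length (List.range (s.length + 1)) 0)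

-- ===== PRECONDITION & SPEC =====
def Spec_truncate_taxonomy_up_to_rank (taxonomy_str : String) (rank_code : String) (out : String) : Prop := out = truncate_taxonomy_up_to_rank_alt taxonomy_str rank_code
instance (taxonomy_str : String) (rank_code : String) (out : String) : Decidable (Spec_truncate_taxonomy_up_to_rank taxonomy_str rank_code out) := by unfold Spec_truncate_taxonomy_up_to_rank; infer_instance

-- ===== CLAIM (what is proved, stated in full; the proofs are below) =====
def Claim_equal_truncate_taxonomy_up_to_rank : Prop := ∀ (taxonomy_str : String) (rank_code : String), Dom_truncate_taxonomy_up_to_rank taxonomy_str rank_code → Spec_truncate_taxonomy_up_to_rank taxonomy_str rank_code (truncate_taxonomy_up_to_rank taxonomy_str rank_code)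

-- ===== LEMMAS AND PROOFS =====

-- Structural reference for splitOn with the one-character separator ';'.
def pvSp : List Char → List (List Char)
  | [] => [[]]
  | c :: t => if c = ';' then [] :: pvSp t else (pvSp t).modifyHead (c :: ·)

theorem pvSp_ne_nil (s : List Char) : pvSp s ≠ [] := by
  cases s with
  | nil => simp [pvSp]
  | cons c t =>
    simp only [pvSp]
    split
    · simp
    · cases hs : pvSp t with
      | nil => exact absurd hs (pvSp_ne_nil t)
      | cons a l => simp [List.modifyHead]

theorem pvSp_go_eq (fuel : Nat) : ∀ (l cur : List Char) (acc : List (List Char)),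
    l.length < fuel →
    PySem.Chars.splitOn.go [';'] fuel l cur acc = acc.reverse ++ (pvSp l).modifyHead (cur.reverse ++ ·) := by
  induction fuel with
  | zero => intro l cur acc h; omega
  | succ fuel ih =>
    intro l cur acc h
    cases l with
    | nil =>
      rw [PySem.Chars.splitOn.go]
      · simp [pvSp, List.modifyHead]
      · omega
    | cons c rest =>
      rw [PySem.Chars.splitOn.go]
      by_cases hc : c = ';'
      · have hp : [';'].isPrefixOf (c :: rest) = true := by simp [hc, List.isPrefixOf]
        rw [if_pos hp]
        simp only [List.length_cons] at h
        rw [ih _ _ _ (by simpa using Nat.lt_of_succ_lt_succ h)]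
        simp only [pvSp, hc, List.modifyHead]
        cases hs : pvSp rest <;> simp [hs]
      · have hp : ¬ ([';'].isPrefixOf (c :: rest) = true) := by
          simp [List.isPrefixOf]
          exact fun h => hc h.symm
        rw [if_neg hp]
        simp only [List.length_cons] at h
        rw [ih _ _ _ (Nat.lt_of_succ_lt_succ h)]
        simp only [pvSp, hc]
        cases hs : pvSp rest with
        | nil => exact absurd hs (pvSp_ne_nil rest)
        | cons a l => simp [List.modifyHead]

theorem splitOn_eq_pvSp (s : List Char) : PySem.Chars.splitOn s [';'] = pvSp s := by
  show PySem.Chars.splitOn.go [';'] (s.length + 1) s [] [] = pvSp s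
  rw [pvSp_go_eq (s.length + 1) s [] [] (by omega)]
  cases hs : pvSp s with
  | nil => exact absurd hs (pvSp_ne_nil s)
  | cons a l => simp [List.modifyHead]

-- Boolean predicate 'is not the separator' (kept as a named def so simp does not rewrite the lambda).
def pvNotSemi (c : Char) : Bool := c != ';'

-- Segment-wise view of pvSp.
theorem pvSp_seg (s : List Char) :
    pvSp s = s.takeWhile pvNotSemi ::
      (match s.dropWhile pvNotSemi with | [] => ([] : List (List Char)) | _ :: r => pvSp r) := by
  induction s with
  | nil => simp [pvSp]
  | cons c t ih =>
    by_cases hc : c = ';'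
    · subst hc; simp [pvSp, pvNotSemi]
    · simp only [pvSp, if_neg hc, ih, List.takeWhile_cons, List.dropWhile_cons]
      have hns : pvNotSemi c = true := by simp [pvNotSemi, hc]
      simp [hns, List.modifyHead]

-- The common reference recursion: truncate segment-wise.
def pvF (pfx : List Char) (s : List Char) : List Char :=
  if pfx.isPrefixOf (s.takeWhile pvNotSemi) then s.takeWhile pvNotSemi
  else
    match h : s.dropWhile pvNotSemi with
    | [] => s
    | _ :: r => s.takeWhile pvNotSemi ++ ';' :: pvF pfx r
termination_by s.length
decreasing_by
  have h1 : (s.dropWhile pvNotSemi).length ≤ s.length := (List.dropWhile_sublist (l := s) (p := pvNotSemi)).length_le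
  rw [h] at h1
  simp at h1
  omega

theorem pvF_pos (pfx s : List Char) (h : pfx.isPrefixOf (s.takeWhile pvNotSemi)) :
    pvF pfx s = s.takeWhile pvNotSemi := by
  rw [pvF, if_pos h]

theorem pvF_nil (pfx s : List Char) (h : ¬ pfx.isPrefixOf (s.takeWhile pvNotSemi))
    (hd : s.dropWhile pvNotSemi = []) : pvF pfx s = s := by
  rw [pvF, if_neg h]
  split
  · rfl
  · rename_i x r heq; rw [hd] at heq; cases heq

theorem pvF_cons (pfx s : List Char) (h : ¬ pfx.isPrefixOf (s.takeWhile pvNotSemi))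
    (x : Char) (r : List Char) (hd : s.dropWhile pvNotSemi = x :: r) :
    pvF pfx s = s.takeWhile pvNotSemi ++ ';' :: pvF pfx r := by
  rw [pvF, if_neg h]
  split
  · rename_i heq; rw [hd] at heq; cases heq
  · rename_i x' r' heq
    rw [hd] at heq
    cases heq
    rfl

theorem pvLoopA_ne_nil (pfx p : List Char) (ps : List (List Char)) : pvLoopA pfx (p :: ps) ≠ [] := by
  simp only [pvLoopA]
  split <;> simp

-- A's computation equals the reference recursion.
theorem A_eq_F (pfx : List Char) (s : List Char) :
    PySem.Chars.join [';'] (pvLoopA pfx (pvSp s)) = pvF pfx s := by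
  by_cases hsw : pfx.isPrefixOf (s.takeWhile pvNotSemi) = true
  · rw [pvSp_seg s, pvF_pos pfx s hsw]
    simp only [pvLoopA]
    rw [if_pos (by simpa [PySem.Chars.startswith] using hsw)]
    exact PySem.Chars.join_singleton _ _
  · cases hd : s.dropWhile pvNotSemi with
    | nil =>
      rw [pvSp_seg s, hd, pvF_nil pfx s hsw hd]
      simp only [pvLoopA]
      rw [if_neg (by simpa [PySem.Chars.startswith] using hsw)]
      rw [PySem.Chars.join_singleton]
      have := List.takeWhile_append_dropWhile (p := pvNotSemi) (l := s)
      rw [hd, List.append_nil] at this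
      exact this
    | cons x r =>
      rw [pvSp_seg s, hd, pvF_cons pfx s hsw x r hd]
      simp only [pvLoopA]
      rw [if_neg (by simpa [PySem.Chars.startswith] using hsw)]
      cases hr : pvSp r with
      | nil => exact absurd hr (pvSp_ne_nil r)
      | cons b l =>
        cases hl : pvLoopA pfx (b :: l) with
        | nil => exact absurd hl (pvLoopA_ne_nil pfx b l)
        | cons q qs =>
          rw [PySem.Chars.join_cons_cons]
          have hjoin : PySem.Chars.join [';'] (q :: qs) = pvF pfx r := by
            rw [← hl, ← hr]
            exact A_eq_F pfx r
          rw [hjoin]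
          simp
termination_by s.length
decreasing_by
  have h1 : (s.dropWhile pvNotSemi).length ≤ s.length := (List.dropWhile_sublist (l := s) (p := pvNotSemi)).length_le
  rw [hd] at h1
  simp at h1
  omega

-- takeWhile/dropWhile of a ';'-free block of known length.
theorem tw_dw_eq (u : List Char) : ∀ (m : Nat), m ≤ u.length →
    (∀ j, j < m → u.getD j ' ' ≠ ';') → (m = u.length ∨ u.getD m ' ' = ';') →
    u.takeWhile pvNotSemi = u.take m ∧ u.dropWhile pvNotSemi = u.drop m := by
  induction u with
  | nil =>
    intro m hm _ _
    have : m = 0 := by simpa using hm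
    subst this
    simp
  | cons c t ih =>
    intro m hm hfree hend
    cases m with
    | zero =>
      have hc : c = ';' := by
        rcases hend with h | h
        · simp at h
        · simpa [List.getD] using h
      simp [pvNotSemi, hc]
    | succ m =>
      have hc : c ≠ ';' := by simpa [List.getD] using hfree 0 (by omega)
      have hrec := ih m (by simpa using hm)
        (fun j hj => by simpa [List.getD] using hfree (j + 1) (by omega))
        (by rcases hend with h | h
            · left; simpa using h
            · right; simpa [List.getD] using h)
      have hns : pvNotSemi c = true := by simp [pvNotSemi, hc]
      constructor
      · simp [hns, hrec.1]
      · simp [hns, hrec.2]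

-- The scan's invariant: from index i with current segment start segStart.
theorem scan_inv (s pfx : List Char) : ∀ (k i segStart : Nat), i + k = s.length → segStart ≤ i →
    (∀ j, segStart ≤ j → j < i → s.getD j ' ' ≠ ';') →
    pvScanB s pfx s.length (List.range' i (k + 1)) segStart
      = s.take segStart ++ pvF pfx (s.drop segStart) := by
  intro k
  induction k with
  | zero =>
    intro i segStart hik hsi hfree
    have hi : i = s.length := by omega
    subst hi
    have hu := tw_dw_eq (s.drop segStart) (s.length - segStart) (by simp)
      (fun j hj => by
        rw [List.getD_eq_getElem?_getD, List.getElem?_drop, ← List.getD_eq_getElem?_getD]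
        exact hfree (segStart + j) (by omega) (by omega))
      (Or.inl (by simp))
    rw [List.range'_one, pvScanB]
    rw [if_pos (Or.inl rfl)]
    rw [PySem.List.slice_natCast, PySem.List.slice_to_natCast]
    have htake : (s.drop segStart).take (s.length - segStart) = s.drop segStart := by
      apply List.take_of_length_le; simp
    by_cases hsw : pfx.isPrefixOf (s.drop segStart)
    · rw [if_pos (by simp [PySem.Chars.startswith, htake, hsw])]
      rw [pvF_pos pfx (s.drop segStart) (by rw [hu.1, htake]; exact hsw)]
      rw [hu.1, htake, List.take_length, List.take_append_drop]
    · rw [if_neg (by simp [PySem.Chars.startswith, htake, hsw])]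
      rw [pvScanB]
      rw [pvF_nil pfx (s.drop segStart) (by rw [hu.1, htake]; exact hsw)
        (by rw [hu.2, List.drop_drop]; apply List.drop_eq_nil_of_le; omega)]
      rw [List.take_append_drop]
  | succ k ih =>
    intro i segStart hik hsi hfree
    have hi : i < s.length := by omega
    rw [List.range'_succ, pvScanB]
    by_cases hb : s.getD i ' ' = ';'
    · rw [if_pos (Or.inr (by simpa using hb))]
      have hu := tw_dw_eq (s.drop segStart) (i - segStart) (by simp; omega)
        (fun j hj => by
          rw [List.getD_eq_getElem?_getD, List.getElem?_drop, ← List.getD_eq_getElem?_getD]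
          exact hfree (segStart + j) (by omega) (by omega))
        (Or.inr (by
          rw [List.getD_eq_getElem?_getD, List.getElem?_drop, ← List.getD_eq_getElem?_getD]
          rwa [Nat.add_sub_cancel' hsi]))
      rw [PySem.List.slice_natCast, PySem.List.slice_to_natCast]
      have hsplit : s.take i = s.take segStart ++ (s.drop segStart).take (i - segStart) := by
        conv_lhs => rw [show i = segStart + (i - segStart) by omega]
        rw [List.take_add]
      have hci : s[i] = ';' := by
        rw [List.getD_eq_getElem?_getD, List.getElem?_eq_getElem hi] at hb
        simpa using hb
      by_cases hsw : pfx.isPrefixOf ((s.drop segStart).take (i - segStart))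
      · rw [if_pos (by simp [PySem.Chars.startswith, hsw])]
        rw [pvF_pos pfx (s.drop segStart) (by rw [hu.1]; exact hsw)]
        rw [hu.1, hsplit]
      · rw [if_neg (by simp [PySem.Chars.startswith, hsw])]
        rw [ih (i + 1) (i + 1) (by omega) (le_refl _) (fun j h1 h2 => by omega)]
        have hdropi : s.drop i = s[i] :: s.drop (i + 1) := List.drop_eq_getElem_cons hi
        rw [pvF_cons pfx (s.drop segStart) (by rw [hu.1]; exact hsw) s[i] (s.drop (i + 1))
          (by rw [hu.2, List.drop_drop, show segStart + (i - segStart) = i by omega]; exact hdropi)]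
        rw [hu.1]
        have h1 : s.take (i + 1) = s.take segStart ++ ((s.drop segStart).take (i - segStart) ++ [';']) := by
          rw [List.take_add_one, List.getElem?_eq_getElem hi]
          simp [hsplit, hci]
        rw [h1]
        simp
    · rw [if_neg (by
        simp only [PySem.List.pyGetD_natCast]
        push Not
        refine ⟨by omega, by simpa using hb⟩)]
      rw [ih (i + 1) segStart (by omega) (by omega)
        (fun j h1 h2 => by
          rcases Nat.lt_or_ge j i with h | h
          · exact hfree j h1 h
          · have : j = i := by omega
            subst this; exact hb)]

-- ===== VERDICT (by name: the statement is the Claim_ definition above) =====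
theorem truncate_taxonomy_up_to_rank_spec : Claim_equal_truncate_taxonomy_up_to_rank := by
  intro ts rc _
  show truncate_taxonomy_up_to_rank ts rc = truncate_taxonomy_up_to_rank_alt ts rc
  unfold truncate_taxonomy_up_to_rank truncate_taxonomy_up_to_rank_alt
  simp only
  rw [splitOn_eq_pvSp, A_eq_F]
  have hr : List.range (ts.toList.length + 1) = List.range' 0 (ts.toList.length + 1) :=
    List.range_eq_range'
  rw [hr, scan_inv ts.toList _ ts.toList.length 0 0 (by omega) (le_refl 0) (fun j h1 h2 => by omega)]
  simp
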